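-- pv_equiv track=rewrite | github.com/stanfordnlp/stanza | stanza/server/java_protobuf_requests.py | misc_to_space_after
-- ===== SOURCE A (Python) =====
-- def misc_to_space_after(misc):
--     """
--     Convert either SpaceAfter=No or the SpacesAfter annotation
--
--     see https://universaldependencies.org/misc.html#spacesafter
--
--     We compensate for some treebanks using SpaceAfter=\n instead of SpacesAfter=\n
--     On the way back, though, those annotations will be turned into SpacesAfter
--
--     # TODO: some treebanks also have SpacesBefore on the first token, and we should honor that
--     """
--     if not misc:
--         return " "
--     pieces = misc.split("|")
--     if any(piece.lower() == "spaceafter=no" for piece in pieces):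
--         return ""
--     if "SpaceAfter=Yes" in pieces:
--         # as of UD 2.11, the Cantonese treebank had this as a misc feature
--         return " "
--     if "SpaceAfter=No~" in pieces:
--         # as of UD 2.11, a weird typo in the Russian Taiga dataset
--         return ""
--     for piece in pieces:
--         if piece.startswith("SpaceAfter=") or piece.startswith("SpacesAfter="):
--             misc_space = piece.split("=", maxsplit=1)[1]
--             spaces = []
--             pos = 0
--             while pos < len(misc_space):
--                 if misc_space[pos:pos+2] == '\\s':
--                     spaces.append(' ')
--                     pos += 2
--                 elif misc_space[pos:pos+2] == '\\t':
--                     spaces.append('\t')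
--                     pos += 2
--                 elif misc_space[pos:pos+2] == '\\r':
--                     spaces.append('\r')
--                     pos += 2
--                 elif misc_space[pos:pos+2] == '\\n':
--                     spaces.append('\n')
--                     pos += 2
--                 elif misc_space[pos:pos+2] == '\\p':
--                     spaces.append('|')
--                     pos += 2
--                 elif misc_space[pos:pos+2] == '\\\\':
--                     spaces.append('\\')
--                     pos += 2
--                 else:
--                     spaces.append(misc_space[pos])
--                     pos += 1
--             space_after = "".join(spaces)
--             return space_after
--     return " "
-- ===== SOURCE B (Python) =====
-- import re
--
-- _ESC = {'\\s': ' ', '\\t': '\t', '\\r': '\r', '\\n': '\n', '\\p': '|', '\\\\': '\\'}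
--
-- def misc_to_space_after(misc):
--     if not misc:
--         return " "
--     has_no = has_yes = has_no_typo = False
--     first_value = None
--     for piece in misc.split("|"):
--         if piece.lower() == "spaceafter=no":
--             has_no = True
--         elif piece == "SpaceAfter=Yes":
--             has_yes = True
--         elif piece == "SpaceAfter=No~":
--             has_no_typo = True
--         elif first_value is None and (piece.startswith("SpaceAfter=") or piece.startswith("SpacesAfter=")):
--             first_value = piece.split("=", 1)[1]
--     if has_no:
--         return ""
--     if has_yes:
--         return " "
--     if has_no_typo:
--         return ""
--     if first_value is None:
--         return " "
--     return re.sub(r'\\(.)', lambda m: _ESC.get(m.group(0), m.group(0)), first_value, flags=re.DOTALL)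
-- ===== Notes on version B (the rewrite author's own statement) =====
-- stated objective: idiomatic
-- what changed: B classifies all MISC pieces in a single pass (flags + first SpaceAfter/SpacesAfter value) instead of A's four separate scans, and unescapes the value with one table-driven re.sub over an escape dict instead of A's manual position-indexed while loop of chained two-character comparisons.
import Mathlib
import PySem

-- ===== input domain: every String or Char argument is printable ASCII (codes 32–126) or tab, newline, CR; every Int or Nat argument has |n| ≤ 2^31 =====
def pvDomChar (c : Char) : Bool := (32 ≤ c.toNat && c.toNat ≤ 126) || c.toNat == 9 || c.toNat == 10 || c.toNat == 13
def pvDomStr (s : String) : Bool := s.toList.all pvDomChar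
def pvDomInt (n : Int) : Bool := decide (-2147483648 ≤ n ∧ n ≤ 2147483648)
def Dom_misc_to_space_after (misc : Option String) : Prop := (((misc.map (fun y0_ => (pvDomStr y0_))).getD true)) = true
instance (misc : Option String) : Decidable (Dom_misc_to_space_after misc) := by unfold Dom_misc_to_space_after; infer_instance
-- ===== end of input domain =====

-- B replaces A's four separate scans over the pieces by one classifying pass and A's manual
-- two-character while-loop unescaper by a table-driven regex substitution (idiomatic; same cost).

-- shared helper: piece.split("=", maxsplit=1)[1]  (both Pythons perform exactly this)
def pvExtract (p : String) : String :=
  (PySem.List.pyGet? ((PySem.Str.splitMax? p "=" 1).getD []) 1).getD ""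

-- shared helper: piece.startswith("SpaceAfter=") or piece.startswith("SpacesAfter=")
def pvIsSpacePiece (p : String) : Bool :=
  PySem.Str.startswith p "SpaceAfter=" || PySem.Str.startswith p "SpacesAfter="

-- ===== PORT A =====
-- A's while loop over pos, comparing the slice misc_space[pos:pos+2]
def aUnescape (s : List Char) (pos : Nat) : List Char :=
  if h : pos < s.length then
    let w := PySem.Chars.slice s (some (pos : Int)) (some ((pos : Int) + 2))
    if w = ['\\', 's'] then ' ' :: aUnescape s (pos + 2)
    else if w = ['\\', 't'] then '\t' :: aUnescape s (pos + 2)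
    else if w = ['\\', 'r'] then '\r' :: aUnescape s (pos + 2)
    else if w = ['\\', 'n'] then '\n' :: aUnescape s (pos + 2)
    else if w = ['\\', 'p'] then '|' :: aUnescape s (pos + 2)
    else if w = ['\\', '\\'] then '\\' :: aUnescape s (pos + 2)
    else s[pos] :: aUnescape s (pos + 1)
  else []
termination_by s.length - pos

-- A's final 'for piece in pieces:' loop
def aFindLoop : List String → String
  | [] => " "
  | p :: rest =>
    if pvIsSpacePiece p then String.ofList (aUnescape (pvExtract p).toList 0)
    else aFindLoop rest

def misc_to_space_after (misc : Option String) : String :=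
  match misc with
  | none => " "
  | some s =>
    if s = "" then " "
    else
      let pieces := (PySem.Str.split? s "|").getD []
      if pieces.any (fun p => PySem.Str.lower p == "spaceafter=no") then ""
      else if pieces.contains "SpaceAfter=Yes" then " "
      else if pieces.contains "SpaceAfter=No~" then ""
      else aFindLoop pieces

-- ===== PORT B =====
def bMap : PySem.Dict String String :=
  PySem.Dict.ofList [("\\s", " "), ("\\t", "\t"), ("\\r", "\r"), ("\\n", "\n"), ("\\p", "|"), ("\\\\", "\\")]

-- re.sub(r'\\(.)', …, flags=re.DOTALL): non-overlapping left-to-right backslash pairs, dict lookup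
def bSub : List Char → List Char
  | '\\' :: c :: rest => (PySem.Dict.getD bMap (String.ofList ['\\', c]) (String.ofList ['\\', c])).toList ++ bSub rest
  | c :: rest => c :: bSub rest
  | [] => []

-- B's single classifying pass: state = (has_no, has_yes, has_no_typo, first_value)
def bStep (st : Bool × Bool × Bool × Option String) (p : String) : Bool × Bool × Bool × Option String :=
  if PySem.Str.lower p == "spaceafter=no" then (true, st.2)
  else if p == "SpaceAfter=Yes" then (st.1, true, st.2.2)
  else if p == "SpaceAfter=No~" then (st.1, st.2.1, true, st.2.2.2)
  else if st.2.2.2.isNone && pvIsSpacePiece p then (st.1, st.2.1, st.2.2.1, some (pvExtract p))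
  else st

def misc_to_space_after_alt (misc : Option String) : String :=
  match misc with
  | none => " "
  | some s =>
    if s = "" then " "
    else
      let pieces := (PySem.Str.split? s "|").getD []
      let st := pieces.foldl bStep (false, false, false, none)
      if st.1 then ""
      else if st.2.1 then " "
      else if st.2.2.1 then ""
      else
        match st.2.2.2 with
        | none => " "
        | some v => String.ofList (bSub v.toList)

-- ===== PRECONDITION & SPEC =====
def Spec_misc_to_space_after (misc : Option String) (out : String) : Prop := out = misc_to_space_after_alt misc
instance (misc : Option String) (out : String) : Decidable (Spec_misc_to_space_after misc out) := by unfold Spec_misc_to_space_after; infer_instance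

-- ===== CLAIM (what is proved, stated in full; the proofs are below) =====
def Claim_equal_misc_to_space_after : Prop := ∀ (misc : Option String), Dom_misc_to_space_after misc → Spec_misc_to_space_after misc (misc_to_space_after misc)

-- ===== LEMMAS AND PROOFS =====

theorem foldl_fst (pieces : List String) (st : Bool × Bool × Bool × Option String) :
    (pieces.foldl bStep st).1 = (st.1 || pieces.any (fun p => PySem.Str.lower p == "spaceafter=no")) := by
  induction pieces generalizing st with
  | nil => simp
  | cons p rest ih =>
    simp only [List.foldl_cons, List.any_cons]
    by_cases h1 : (PySem.Str.lower p == "spaceafter=no") = true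
    · rw [bStep, if_pos h1, ih, h1]
      simp
    · have hb : (PySem.Str.lower p == "spaceafter=no") = false := by simpa using h1
      have hkeep : (bStep st p).1 = st.1 := by
        rw [bStep, if_neg (by simp [hb])]
        split_ifs <;> rfl
      rw [ih, hkeep, hb, Bool.false_or]

theorem foldl_snd (pieces : List String) (st : Bool × Bool × Bool × Option String) :
    (pieces.foldl bStep st).2.1 = (st.2.1 || pieces.contains "SpaceAfter=Yes") := by
  induction pieces generalizing st with
  | nil => simp
  | cons p rest ih =>
    simp only [List.foldl_cons, List.contains_cons]
    by_cases hy : p = "SpaceAfter=Yes"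
    · subst hy
      rw [bStep]
      rw [if_neg (by decide), if_pos (by decide)]
      rw [ih]
      simp
    · have hy' : (p == "SpaceAfter=Yes") = false := by simpa using hy
      have hkeep : (bStep st p).2.1 = st.2.1 := by
        rw [bStep]
        split_ifs with c1 c2 <;> first | rfl | (exact absurd c2 (by simp [hy']))
      rw [ih, hkeep, beq_eq_false_iff_ne.mpr (Ne.symm hy)]
      simp

theorem foldl_trd (pieces : List String) (st : Bool × Bool × Bool × Option String) :
    (pieces.foldl bStep st).2.2.1 = (st.2.2.1 || pieces.contains "SpaceAfter=No~") := by
  induction pieces generalizing st with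
  | nil => simp
  | cons p rest ih =>
    simp only [List.foldl_cons, List.contains_cons]
    by_cases hy : p = "SpaceAfter=No~"
    · subst hy
      rw [bStep]
      rw [if_neg (by decide), if_neg (by decide), if_pos (by decide)]
      rw [ih]
      simp
    · have hy' : (p == "SpaceAfter=No~") = false := by simpa using hy
      have hkeep : (bStep st p).2.2.1 = st.2.2.1 := by
        rw [bStep]
        split_ifs with c1 c2 c3 <;> first | rfl | (exact absurd c3 (by simp [hy']))
      rw [ih, hkeep, beq_eq_false_iff_ne.mpr (Ne.symm hy)]
      simp

theorem foldl_val_some (pieces : List String) (st : Bool × Bool × Bool × Option String)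
    (h : st.2.2.2.isSome) : (pieces.foldl bStep st).2.2.2 = st.2.2.2 := by
  induction pieces generalizing st with
  | nil => rfl
  | cons p rest ih =>
    have hn : st.2.2.2.isNone = false := by
      cases hv : st.2.2.2 <;> simp_all
    have hkeep : (bStep st p).2.2.2 = st.2.2.2 ∧ (bStep st p).2.2.2.isSome := by
      rw [bStep]
      split_ifs with c1 c2 c3 c4 <;> first | exact ⟨rfl, h⟩ | (exact absurd c4 (by simp [hn]))
    rw [List.foldl_cons, ih _ hkeep.2, hkeep.1]

theorem foldl_val (pieces : List String) (st : Bool × Bool × Bool × Option String)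
    (hst : st.2.2.2 = none)
    (h1 : ∀ p ∈ pieces, (PySem.Str.lower p == "spaceafter=no") = false)
    (h2 : "SpaceAfter=Yes" ∉ pieces) (h3 : "SpaceAfter=No~" ∉ pieces) :
    (pieces.foldl bStep st).2.2.2 = (pieces.find? pvIsSpacePiece).map pvExtract := by
  induction pieces generalizing st with
  | nil => simpa using hst
  | cons p rest ih =>
    simp only [List.mem_cons, not_or] at h2 h3
    have hlp := h1 p (List.mem_cons_self ..)
    have h2' : (p == "SpaceAfter=Yes") = false := beq_eq_false_iff_ne.mpr (Ne.symm h2.1)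
    have h3' : (p == "SpaceAfter=No~") = false := beq_eq_false_iff_ne.mpr (Ne.symm h3.1)
    rw [List.foldl_cons, List.find?_cons, bStep,
        if_neg (by simp [hlp]), if_neg (by simp [h2']), if_neg (by simp [h3'])]
    by_cases hp : pvIsSpacePiece p
    · rw [if_pos (by simp [hst, hp]), hp]
      rw [foldl_val_some rest _ (by simp)]
      simp
    · have hp' : pvIsSpacePiece p = false := by simpa using hp
      rw [if_neg (by simp [hp']), hp']
      exact ih st hst (fun q hq => h1 q (List.mem_cons_of_mem _ hq)) h2.2 h3.2

theorem aFindLoop_eq (pieces : List String) :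
    aFindLoop pieces = (match (pieces.find? pvIsSpacePiece).map pvExtract with
      | none => " "
      | some v => String.ofList (aUnescape v.toList 0)) := by
  induction pieces with
  | nil => rfl
  | cons p rest ih =>
    rw [aFindLoop, List.find?_cons]
    by_cases hp : pvIsSpacePiece p
    · rw [if_pos hp, hp]
      rfl
    · have hp' : pvIsSpacePiece p = false := by simpa using hp
      rw [if_neg (by simp [hp']), hp', ih]

theorem bSub_cons_ne (c : Char) (rest : List Char) (h : c ≠ '\\') :
    bSub (c :: rest) = c :: bSub rest := by
  rw [bSub.eq_def]
  split
  · rename_i heq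
    exact absurd (List.cons.inj heq).1 h
  · rename_i heq
    injection heq with h1 h2
    subst h1; subst h2; rfl
  · rename_i heq
    exact absurd heq (List.cons_ne_nil _ _)

theorem bSub_esc (c : Char) (rest : List Char) :
    bSub ('\\' :: c :: rest) =
      (PySem.Dict.getD bMap (String.ofList ['\\', c]) (String.ofList ['\\', c])).toList ++ bSub rest := by
  rw [bSub.eq_def]
  split
  · rename_i heq
    injection heq with h1 h2
    injection h2 with h2 h3
    subst h2; subst h3; rfl
  · rename_i hx heq
    injection heq with h1 h2
    exact absurd trivial (by simpa using hx c rest h1.symm h2.symm)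
  · rename_i heq
    exact absurd heq (List.cons_ne_nil _ _)

-- the two unescape loops agree: A at position pos computes B's substitution of the suffix
theorem bMap_getD_unknown (c : Char) (h1 : c ≠ 's') (h2 : c ≠ 't') (h3 : c ≠ 'r')
    (h4 : c ≠ 'n') (h5 : c ≠ 'p') (h6 : c ≠ '\\') :
    PySem.Dict.getD bMap (String.ofList ['\\', c]) (String.ofList ['\\', c]) = String.ofList ['\\', c] := by
  have key : ∀ (d : Char) (t : String), t.toList = ['\\', d] → c ≠ d →
      (t == String.ofList ['\\', c]) = false := by
    intro d t ht hne
    apply beq_eq_false_iff_ne.mpr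
    intro he
    have h' := congrArg String.toList he
    rw [ht] at h'
    simp at h'
    exact hne h'.symm
  have hbm : bMap = PySem.Dict.mk [("\\s", " "), ("\\t", "\t"), ("\\r", "\r"), ("\\n", "\n"), ("\\p", "|"), ("\\\\", "\\")] := by decide
  rw [PySem.Dict.getD_eq_get?_getD, hbm]
  simp only [PySem.Dict.get?_mk_cons,
    key 's' "\\s" (by decide) h1, key 't' "\\t" (by decide) h2, key 'r' "\\r" (by decide) h3,
    key 'n' "\\n" (by decide) h4, key 'p' "\\p" (by decide) h5, key '\\' "\\\\" (by decide) h6,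
    Bool.false_eq_true, if_false]
  rfl

theorem aUnescape_eq_bSub (s : List Char) (pos : Nat) :
    aUnescape s pos = bSub (s.drop pos) := by
  induction hfuel : s.length - pos using Nat.strong_induction_on generalizing pos with
  | _ fuel ih =>
  by_cases h : pos < s.length
  · have hdrop := List.drop_eq_getElem_cons h
    have hsl : PySem.Chars.slice s (some (pos : Int)) (some ((pos : Int) + 2)) = (s.drop pos).take 2 := by
      rw [PySem.Chars.slice_eq_listSlice]
      exact_mod_cast PySem.List.slice_natCast_add s pos 2
    rw [aUnescape]
    simp only [h, dif_pos]
    rw [hsl]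
    by_cases hb : s[pos] = '\\'
    · by_cases h2 : pos + 1 < s.length
      · have hdrop2 := List.drop_eq_getElem_cons h2
        have hw : (s.drop pos).take 2 = ['\\', s[pos+1]] := by
          rw [hdrop, hdrop2, hb]; rfl
        have hrec2 : aUnescape s (pos + 2) = bSub (s.drop (pos + 2)) :=
          ih (s.length - (pos + 2)) (by omega) _ rfl
        have hrec1 : aUnescape s (pos + 1) = bSub (s.drop (pos + 1)) :=
          ih (s.length - (pos + 1)) (by omega) _ rfl
        rw [hw, hdrop, hdrop2, hb, bSub_esc]
        by_cases e1 : s[pos+1] = 's'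
        · rw [if_pos (by rw [e1]), hrec2, e1,
             show PySem.Dict.getD bMap (String.ofList ['\\', 's']) (String.ofList ['\\', 's']) = " " from by decide]
          rfl
        · rw [if_neg (by simp [e1])]
          by_cases e2 : s[pos+1] = 't'
          · rw [if_pos (by rw [e2]), hrec2, e2,
               show PySem.Dict.getD bMap (String.ofList ['\\', 't']) (String.ofList ['\\', 't']) = "\t" from by decide]
            rfl
          · rw [if_neg (by simp [e2])]
            by_cases e3 : s[pos+1] = 'r'
            · rw [if_pos (by rw [e3]), hrec2, e3,
                 show PySem.Dict.getD bMap (String.ofList ['\\', 'r']) (String.ofList ['\\', 'r']) = "\r" from by decide]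
              rfl
            · rw [if_neg (by simp [e3])]
              by_cases e4 : s[pos+1] = 'n'
              · rw [if_pos (by rw [e4]), hrec2, e4,
                   show PySem.Dict.getD bMap (String.ofList ['\\', 'n']) (String.ofList ['\\', 'n']) = "\n" from by decide]
                rfl
              · rw [if_neg (by simp [e4])]
                by_cases e5 : s[pos+1] = 'p'
                · rw [if_pos (by rw [e5]), hrec2, e5,
                     show PySem.Dict.getD bMap (String.ofList ['\\', 'p']) (String.ofList ['\\', 'p']) = "|" from by decide]
                  rfl
                · rw [if_neg (by simp [e5])]
                  by_cases e6 : s[pos+1] = '\\'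
                  · rw [if_pos (by rw [e6]), hrec2, e6,
                       show PySem.Dict.getD bMap (String.ofList ['\\', '\\']) (String.ofList ['\\', '\\']) = "\\" from by decide]
                    rfl
                  · rw [if_neg (by simp [e6]), hrec1, hdrop2,
                       bSub_cons_ne _ _ e6, bMap_getD_unknown _ e1 e2 e3 e4 e5 e6]
                    simp
      · have hdropnil : s.drop (pos + 1) = [] := List.drop_eq_nil_of_le (by omega)
        have hw : (s.drop pos).take 2 = ['\\'] := by rw [hdrop, hdropnil, hb]; rfl
        have hrec1 : aUnescape s (pos + 1) = bSub (s.drop (pos + 1)) :=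
          ih (s.length - (pos + 1)) (by omega) _ rfl
        rw [hw, hdrop, hdropnil, hb, hrec1, hdropnil]
        rw [if_neg (by decide), if_neg (by decide), if_neg (by decide), if_neg (by decide),
            if_neg (by decide), if_neg (by decide)]
        rfl
    · have hw2 : ∀ c2 : Char, (s.drop pos).take 2 ≠ ['\\', c2] := by
        intro c2 hcontra
        rw [hdrop] at hcontra
        exact hb (List.cons.inj hcontra).1
      have hrec1 : aUnescape s (pos + 1) = bSub (s.drop (pos + 1)) :=
        ih (s.length - (pos + 1)) (by omega) _ rfl
      rw [if_neg (hw2 _), if_neg (hw2 _), if_neg (hw2 _), if_neg (hw2 _), if_neg (hw2 _),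
          if_neg (hw2 _), hrec1, hdrop, bSub_cons_ne _ _ hb]
  · rw [aUnescape]
    simp only [h]
    rw [List.drop_eq_nil_of_le (by omega)]
    rfl

-- ===== VERDICT (by name: the statement is the Claim_ definition above) =====
theorem misc_to_space_after_spec : Claim_equal_misc_to_space_after := by
  intro misc _
  unfold Spec_misc_to_space_after
  cases misc with
  | none => rfl
  | some s =>
    simp only [misc_to_space_after, misc_to_space_after_alt]
    by_cases hs : s = ""
    · simp [hs]
    · simp only [hs, if_false]
      rw [foldl_fst, foldl_snd, foldl_trd]
      simp only [Bool.false_or]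
      split_ifs with d1 d2 d3
      · rfl
      · rfl
      · rfl
      · rw [foldl_val _ _ rfl
          (by intro p hp
              have hall : ∀ x ∈ (PySem.Str.split? s "|").getD [], ¬PySem.Str.lower x = "spaceafter=no" := by
                simpa using d1
              simpa using hall p hp)
          (by simpa using d2) (by simpa using d3)]
        rw [aFindLoop_eq]
        cases h : (((PySem.Str.split? s "|").getD []).find? pvIsSpacePiece).map pvExtract with
        | none => rfl
        | some v => simp [aUnescape_eq_bSub]
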